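-- pv_equiv track=rewrite | github.com/kbuck210/pokedata | UpdateDb.py | remapMovesByName
-- ===== SOURCE A (Python) =====
-- def remapMovesByName(allMoves):
--     formMoves = {}
--     for form in allMoves:
--         moveCategories = allMoves[form]
--         moves = {}
--         for category in moveCategories:
--             catMoves = moveCategories[category]
--             for move in catMoves:
--                 if not move in moves:
--                     moves[move] = []
--                 moves[move].append(category)
--         formMoves[form] = moves
--     return formMoves
-- ===== SOURCE B (Python) =====
-- def remapMovesByName(allMoves):
--     def invert(cats):
--         pairs = [(m, c) for c in cats for m in cats[c]]
--         return {m: [c for mm, c in pairs if mm == m]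
--                 for m in dict.fromkeys(m for m, _ in pairs)}
--     return {form: invert(allMoves[form]) for form in allMoves}
-- ===== Notes on version B (the rewrite author's own statement) =====
-- stated objective: alternative
-- what changed: Instead of appending categories into per-move lists inside a single dict-building inversion loop, B is a staged comprehension: per form it flattens the categories into (move, category) pairs, takes the first-appearance ordered set of moves (dict.fromkeys), and builds each move's category list by filtering the flattened pairs (build-index-then-rescan instead of append-during-inversion).
import Mathlib
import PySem

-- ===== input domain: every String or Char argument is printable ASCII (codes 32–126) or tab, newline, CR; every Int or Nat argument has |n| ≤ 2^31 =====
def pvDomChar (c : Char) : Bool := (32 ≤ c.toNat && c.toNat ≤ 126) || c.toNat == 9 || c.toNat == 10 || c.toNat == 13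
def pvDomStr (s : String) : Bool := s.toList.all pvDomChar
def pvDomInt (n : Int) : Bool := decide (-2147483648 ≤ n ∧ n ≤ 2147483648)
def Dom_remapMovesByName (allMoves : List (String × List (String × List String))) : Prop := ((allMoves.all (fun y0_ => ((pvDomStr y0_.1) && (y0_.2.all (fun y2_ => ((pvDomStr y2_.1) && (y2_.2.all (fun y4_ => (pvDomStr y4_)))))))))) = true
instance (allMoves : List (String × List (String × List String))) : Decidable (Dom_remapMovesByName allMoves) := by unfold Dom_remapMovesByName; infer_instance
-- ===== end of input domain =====

-- B replaces A's append-during-inversion dict loop by staged comprehensions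
-- (flatten to pairs, ordered dedup of moves, filter per move); alternative decomposition, not faster.

-- ===== PORT A =====
-- inner loop of A over one form's categories: append the category once per occurrence of the move
def remapInnerA (cats : List (String × List String)) : List (String × List String) :=
  (cats.foldl (fun moves p =>
      p.2.foldl (fun moves move => moves.modify move [] (· ++ [p.1])) moves)
    PySem.Dict.empty).items

def remapMovesByName (allMoves : List (String × List (String × List String))) : List (String × List (String × List String)) :=
  (allMoves.foldl (fun fm p => fm.insert p.1 (remapInnerA p.2)) PySem.Dict.empty).items

-- ===== PORT B =====
-- the dict value for key f: the assoc list encodes a Python dict, whose value for a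
-- repeated key is the LAST one bound (dict building semantics); exact for dict inputs
def lastCats (allMoves : List (String × List (String × List String))) (f : String) : List (String × List String) :=
  ((allMoves.reverse.find? (fun p => p.1 == f)).map (·.2)).getD []

-- B's invert(cats): flatten to (move, category) pairs, dedup moves, filter per move
def remapInnerB (cats : List (String × List String)) : List (String × List String) :=
  let pairs := cats.flatMap (fun p => p.2.map (fun m => (m, p.1)))
  (PySem.List.dedup (pairs.map (·.1))).map
    (fun m => (m, (pairs.filter (fun q => q.1 == m)).map (·.2)))

def remapMovesByName_alt (allMoves : List (String × List (String × List String))) : List (String × List (String × List String)) :=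
  (PySem.List.dedup (allMoves.map (·.1))).map
    (fun f => (f, remapInnerB (lastCats allMoves f)))

-- ===== PRECONDITION & SPEC =====
def Spec_remapMovesByName (allMoves : List (String × List (String × List String))) (out : List (String × List (String × List String))) : Prop := out = remapMovesByName_alt allMoves
instance (allMoves : List (String × List (String × List String))) (out : List (String × List (String × List String))) : Decidable (Spec_remapMovesByName allMoves out) := by unfold Spec_remapMovesByName; infer_instance

-- ===== CLAIM =====
def Claim_equal_remapMovesByName : Prop := ∀ (allMoves : List (String × List (String × List String))), Dom_remapMovesByName allMoves → Spec_remapMovesByName allMoves (remapMovesByName allMoves)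

-- ===== LEMMAS AND PROOFS =====

-- the nested per-category loop of A is the single loop over the flattened pairs
theorem innerA_eq_pairs_foldl (cats : List (String × List String)) :
    (cats.foldl (fun moves p =>
        p.2.foldl (fun moves move => moves.modify move [] (· ++ [p.1])) moves)
      PySem.Dict.empty)
    = (cats.flatMap (fun p => p.2.map (fun m => (m, p.1)))).foldl
        (fun d q => d.modify q.1 [] (· ++ [q.2])) PySem.Dict.empty := by
  generalize (PySem.Dict.empty : PySem.Dict String (List String)) = d
  induction cats generalizing d with
  | nil => rfl
  | cons c rest ih =>
    simp only [List.foldl_cons, List.flatMap_cons, List.foldl_append, ih, List.foldl_map]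

theorem inner_eq (cats : List (String × List String)) : remapInnerA cats = remapInnerB cats := by
  unfold remapInnerA remapInnerB
  rw [innerA_eq_pairs_foldl]
  set pairs := cats.flatMap (fun p => p.2.map (fun m => (m, p.1))) with hp
  have hnd : ((pairs.foldl (fun d q => d.modify q.1 [] (· ++ [q.2])) PySem.Dict.empty)).keys.Nodup := by
    exact PySem.Dict.nodup_keys_foldl_modify_key pairs (·.1) [] (fun d q => (· ++ [q.2]))
      PySem.Dict.empty (by simp)
  rw [PySem.Dict.items_eq_map_keys _ hnd []]
  rw [PySem.Dict.keys_foldl_modify_key]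
  simp only [PySem.Dict.keys_empty, PySem.Set.update_nil_left, ← PySem.List.dedup_eq_ofList]
  refine List.map_congr_left ?_
  intro m hm
  rw [PySem.Dict.getD_foldl_modify_append]
  simp [PySem.Dict.getD_empty]

-- the value stored by an insert loop keyed on .1 is the one from the LAST matching pair
theorem getD_foldl_insert_last {β γ : Type} (g : β → γ)
    (l : List (String × β)) (d : PySem.Dict String γ) (k : String) (dflt : γ) :
    ((l.foldl (fun d p => d.insert p.1 (g p.2)) d).getD k dflt)
    = (match l.reverse.find? (fun p => p.1 == k) with
       | some p => g p.2
       | none => d.getD k dflt) := by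
  induction l using List.reverseRecOn generalizing d with
  | nil => simp
  | append_singleton xs p ih =>
    rw [List.foldl_append]
    simp only [List.foldl_cons, List.foldl_nil, List.reverse_append, List.reverse_cons,
      List.reverse_nil, List.nil_append, List.cons_append]
    by_cases hk : p.1 = k
    · rw [List.find?_cons_of_pos (h := by simp [hk])]
      simp [hk, PySem.Dict.getD_insert_self]
    · rw [List.find?_cons_of_neg (h := by simp [hk])]
      rw [PySem.Dict.getD_insert_of_ne _ _ _ (Ne.symm hk)]
      exact ih d

-- the items of A's outer insert loop are B's map over the deduped form names
theorem outer_items (allMoves : List (String × List (String × List String))) :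
    (allMoves.foldl (fun fm p => fm.insert p.1 (remapInnerB p.2)) PySem.Dict.empty).items
    = (PySem.List.dedup (allMoves.map (·.1))).map
        (fun f => (f, remapInnerB (lastCats allMoves f))) := by
  have hnd : ((allMoves.foldl (fun fm p => fm.insert p.1 (remapInnerB p.2)) PySem.Dict.empty)).keys.Nodup :=
    PySem.Dict.nodup_keys_foldl_insert_key allMoves (·.1) (fun _ p => remapInnerB p.2)
      PySem.Dict.empty (by simp)
  rw [PySem.Dict.items_eq_map_keys _ hnd []]
  rw [PySem.Dict.keys_foldl_insert_key]
  simp only [PySem.Dict.keys_empty, PySem.Set.update_nil_left, ← PySem.List.dedup_eq_ofList]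
  refine List.map_congr_left ?_
  intro f hf
  rw [getD_foldl_insert_last]
  have hmem : f ∈ allMoves.map (·.1) := (PySem.List.mem_dedup _ _).1 hf
  cases hfind : allMoves.reverse.find? (fun p => p.1 == f) with
  | none =>
    exfalso
    obtain ⟨p, hp, hpk⟩ := List.mem_map.1 hmem
    have : ¬ (p.1 == f) = true := by
      have := List.find?_eq_none.1 hfind p (by simpa using hp)
      simpa using this
    exact this (by simp [hpk])
  | some p =>
    simp only [lastCats, hfind, Option.map_some, Option.getD_some]

-- ===== VERDICT =====
theorem remapMovesByName_spec : Claim_equal_remapMovesByName := by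
  intro allMoves _
  unfold Spec_remapMovesByName remapMovesByName remapMovesByName_alt
  have hfun : (fun (fm : PySem.Dict String (List (String × List String))) (p : String × List (String × List String)) => fm.insert p.1 (remapInnerA p.2))
       = (fun fm p => fm.insert p.1 (remapInnerB p.2)) := by
    funext fm p; rw [inner_eq]
  rw [hfun, outer_items]
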